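-- pv_equiv track=rewrite | github.com/yruns/3DVLMReasoning | conceptgraph/detection/generate_gsa.py | process_tag_classes
-- ===== SOURCE A (Python) =====
-- def process_tag_classes(
--     text_prompt: str,
--     add_classes: list[str] | None = None,
--     remove_classes: list[str] | None = None,
-- ) -> list[str]:
--     """Convert a Tag2Text/RAM text prompt to a deduplicated class list."""
--     add_classes = add_classes or []
--     remove_classes = remove_classes or []
--
--     classes = [c.strip() for c in text_prompt.split(",") if c.strip()]
--
--     for c in add_classes:
--         if c not in classes:
--             classes.append(c)
--
--     for c in remove_classes:
--         classes = [cls for cls in classes if c not in cls.lower()]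
--
--     return classes
-- ===== SOURCE B (Python) =====
-- def process_tag_classes(
--     text_prompt: str,
--     add_classes: list[str] | None = None,
--     remove_classes: list[str] | None = None,
-- ) -> list[str]:
--     """Convert a Tag2Text/RAM text prompt to a deduplicated class list."""
--     removes = remove_classes or []
--
--     def survives(cls: str) -> bool:
--         low = cls.lower()
--         for r in removes:
--             if r in low:
--                 return False
--         return True
--
--     out = []
--     seen = set()
--     for tok in text_prompt.split(","):
--         t = tok.strip()
--         if t:
--             seen.add(t)
--             if survives(t):
--                 out.append(t)
--     for c in (add_classes or []):
--         if c not in seen: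
--             seen.add(c)
--             if survives(c):
--                 out.append(c)
--     return out
-- ===== Notes on version B (the rewrite author's own statement) =====
-- stated objective: alternative
-- what changed: Instead of building a classes list, deduplicating adds with a linear list scan, and then rebuilding the list once per remove term, B is one fused pass that emits each surviving candidate directly into the output while maintaining a hash set of seen classes, so the intermediate list and the per-remove rebuilds disappear.
import Mathlib
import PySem

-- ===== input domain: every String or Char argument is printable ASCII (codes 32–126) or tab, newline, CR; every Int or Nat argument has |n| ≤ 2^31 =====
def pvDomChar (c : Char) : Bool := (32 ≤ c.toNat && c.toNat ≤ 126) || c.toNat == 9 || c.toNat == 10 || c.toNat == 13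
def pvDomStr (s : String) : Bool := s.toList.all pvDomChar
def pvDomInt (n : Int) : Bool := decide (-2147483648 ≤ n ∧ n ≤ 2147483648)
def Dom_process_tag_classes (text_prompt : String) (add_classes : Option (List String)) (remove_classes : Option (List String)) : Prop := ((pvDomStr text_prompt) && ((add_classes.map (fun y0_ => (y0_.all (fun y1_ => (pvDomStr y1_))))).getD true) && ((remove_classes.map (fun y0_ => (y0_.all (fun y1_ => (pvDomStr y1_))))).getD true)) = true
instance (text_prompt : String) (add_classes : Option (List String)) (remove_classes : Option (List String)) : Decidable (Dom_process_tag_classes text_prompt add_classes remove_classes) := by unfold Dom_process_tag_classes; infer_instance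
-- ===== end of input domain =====

-- ===== PORT A =====
-- B fuses A's three stages (parse list, dedup adds by list scan, per-remove-term rebuilds) into one
-- pass with a seen-set that emits survivors directly; same return values (objective: alternative).
def process_tag_classes (text_prompt : String) (add_classes : Option (List String)) (remove_classes : Option (List String)) : List String :=
  let add := add_classes.getD []      -- `add_classes or []`
  let rem := remove_classes.getD []   -- `remove_classes or []`
  let classes :=
    ((((PySem.Str.split? text_prompt ",").getD [])).filter
      (fun c => !(PySem.Str.strip c == ""))).map (fun c => PySem.Str.strip c)
  let classes := add.foldl (fun cl c => if cl.contains c then cl else cl ++ [c]) classes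
  rem.foldl (fun cl c => cl.filter (fun cls => !(PySem.Str.isIn c (PySem.Str.lower cls)))) classes

-- ===== PORT B =====
-- B's `survives` helper (the early-return loop over `removes` is exactly List.all of the negated test)
def ptc_survives (removes : List String) (cls : String) : Bool :=
  let low := PySem.Str.lower cls
  removes.all (fun r => !(PySem.Str.isIn r low))

-- one iteration of B's first loop (strip, skip empties, emit survivor, record in seen)
def ptc_step1 (removes : List String) (st : List String × PySem.Set String) (tok : String) : List String × PySem.Set String :=
  let t := PySem.Str.strip tok
  if t == "" then st
  else ((if ptc_survives removes t then st.1 ++ [t] else st.1), PySem.Set.add st.2 t)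

-- one iteration of B's second loop (set-membership dedup, emit survivor)
def ptc_step2 (removes : List String) (st : List String × PySem.Set String) (c : String) : List String × PySem.Set String :=
  if PySem.Set.contains st.2 c then st
  else ((if ptc_survives removes c then st.1 ++ [c] else st.1), PySem.Set.add st.2 c)

def process_tag_classes_alt (text_prompt : String) (add_classes : Option (List String)) (remove_classes : Option (List String)) : List String :=
  let removes := remove_classes.getD []
  let st1 := (((PySem.Str.split? text_prompt ",").getD [])).foldl (ptc_step1 removes) ([], PySem.Set.empty)
  let st2 := (add_classes.getD []).foldl (ptc_step2 removes) st1
  st2.1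

-- ===== PRECONDITION & SPEC =====
def Spec_process_tag_classes (text_prompt : String) (add_classes : Option (List String)) (remove_classes : Option (List String)) (out : List String) : Prop := out = process_tag_classes_alt text_prompt add_classes remove_classes
instance (text_prompt : String) (add_classes : Option (List String)) (remove_classes : Option (List String)) (out : List String) : Decidable (Spec_process_tag_classes text_prompt add_classes remove_classes out) := by unfold Spec_process_tag_classes; infer_instance

-- ===== CLAIM (what is proved, stated in full; the proofs are below) =====
def Claim_equal_process_tag_classes : Prop := ∀ (text_prompt : String) (add_classes : Option (List String)) (remove_classes : Option (List String)), Dom_process_tag_classes text_prompt add_classes remove_classes → Spec_process_tag_classes text_prompt add_classes remove_classes (process_tag_classes text_prompt add_classes remove_classes)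

-- ===== LEMMAS AND PROOFS =====
-- A's per-remove-term filter fold equals one filter by the conjunction of all terms (= ptc_survives)
theorem foldl_filter_eq_filter_all {α β : Type} (p : β → α → Bool) :
    ∀ (rs : List β) (xs : List α),
      rs.foldl (fun cl c => cl.filter (fun x => !(p c x))) xs
        = xs.filter (fun x => rs.all (fun c => !(p c x))) := by
  intro rs
  induction rs with
  | nil => intro xs; simp
  | cons r rest ih =>
    intro xs
    simp [List.foldl_cons, ih, List.filter_filter, Bool.and_comm]

-- step lemmas used by the inductions below
theorem ptc_step1_skip (removes : List String) (st : List String × PySem.Set String) (tok : String)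
    (h : PySem.Str.strip tok = "") : ptc_step1 removes st tok = st := by
  simp [ptc_step1, h]

theorem ptc_step1_keep (removes : List String) (out : List String) (seen : PySem.Set String) (tok : String)
    (h : ¬ PySem.Str.strip tok = "") :
    ptc_step1 removes (out, seen) tok
      = ((if ptc_survives removes (PySem.Str.strip tok) then out ++ [PySem.Str.strip tok] else out),
         PySem.Set.add seen (PySem.Str.strip tok)) := by
  simp [ptc_step1, h]

-- B's first loop: the fused token pass computes the filtered survivors and the seen-set of A's parsed list
theorem ptc_fold1 (removes : List String) :
    ∀ (toks : List String) (out : List String) (seen : PySem.Set String),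
      toks.foldl (ptc_step1 removes) (out, seen)
      = (out ++ (((toks.filter (fun c => !(PySem.Str.strip c == ""))).map
            (fun c => PySem.Str.strip c)).filter (ptc_survives removes)),
         PySem.Set.update seen ((toks.filter (fun c => !(PySem.Str.strip c == ""))).map
            (fun c => PySem.Str.strip c))) := by
  intro toks
  induction toks with
  | nil => intro out seen; simp [PySem.Set.update]
  | cons tok rest ih =>
    intro out seen
    by_cases h : PySem.Str.strip tok = ""
    · rw [List.foldl_cons, ptc_step1_skip removes (out, seen) tok h, ih]
      simp [h]
    · have h' : (PySem.Str.strip tok == "") = false := by simp [h]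
      rw [List.foldl_cons, ptc_step1_keep removes out seen tok h]
      by_cases hs : ptc_survives removes (PySem.Str.strip tok)
      · rw [if_pos hs, ih]
        simp [h', hs, PySem.Set.update]
      · rw [if_neg hs, ih]
        simp [h', hs, PySem.Set.update]

-- B's second loop preserves the invariant (out = filtered classes, seen = set of classes)
theorem ptc_fold2 (removes : List String) :
    ∀ (adds : List String) (cl : List String),
      adds.foldl (ptc_step2 removes) (cl.filter (ptc_survives removes), PySem.Set.ofList cl)
      = ((adds.foldl (fun cl c => if cl.contains c then cl else cl ++ [c]) cl).filter (ptc_survives removes),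
         PySem.Set.ofList (adds.foldl (fun cl c => if cl.contains c then cl else cl ++ [c]) cl)) := by
  intro adds
  induction adds with
  | nil => intro cl; simp
  | cons c rest ih =>
    intro cl
    have hmem : PySem.Set.contains (PySem.Set.ofList cl) c = cl.contains c := by
      by_cases h : c ∈ cl
      · simp [PySem.Set.mem_ofList, h]
      · simp [PySem.Set.mem_ofList, h]
    by_cases h : cl.contains c = true
    · have hstep : ptc_step2 removes (cl.filter (ptc_survives removes), PySem.Set.ofList cl) c
          = (cl.filter (ptc_survives removes), PySem.Set.ofList cl) := by
        simp only [ptc_step2]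
        rw [hmem, if_pos h]
      rw [List.foldl_cons, hstep, List.foldl_cons, if_pos h]
      exact ih cl
    · have hadd : PySem.Set.add (PySem.Set.ofList cl) c = PySem.Set.ofList (cl ++ [c]) := by
        simp [PySem.Set.ofList_eq_foldl, List.foldl_append]
      have hfilt : cl.filter (ptc_survives removes)
            ++ (if ptc_survives removes c then [c] else [])
          = (cl ++ [c]).filter (ptc_survives removes) := by
        by_cases hs : ptc_survives removes c <;> simp [List.filter_append, hs]
      have hstep : ptc_step2 removes (cl.filter (ptc_survives removes), PySem.Set.ofList cl) c
          = ((cl ++ [c]).filter (ptc_survives removes), PySem.Set.ofList (cl ++ [c])) := by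
        simp only [ptc_step2]
        rw [hmem, if_neg h, hadd, ← hfilt]
        by_cases hs : ptc_survives removes c <;> simp [hs]
      rw [List.foldl_cons, hstep, List.foldl_cons, if_neg h]
      exact ih (cl ++ [c])

-- ===== VERDICT (by name: the statement is the Claim_ definition above) =====
theorem process_tag_classes_spec : Claim_equal_process_tag_classes := by
  intro tp ac rc _
  unfold Spec_process_tag_classes process_tag_classes process_tag_classes_alt
  simp only [foldl_filter_eq_filter_all (fun c cls => PySem.Str.isIn c (PySem.Str.lower cls))]
  rw [ptc_fold1]
  have h0 : (([] : List String) ++ ((((PySem.Str.split? tp ",").getD []).filter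
        (fun c => !(PySem.Str.strip c == ""))).map (fun c => PySem.Str.strip c)).filter
        (ptc_survives (rc.getD [])),
      PySem.Set.update PySem.Set.empty ((((PySem.Str.split? tp ",").getD []).filter
        (fun c => !(PySem.Str.strip c == ""))).map (fun c => PySem.Str.strip c)))
      = (((((PySem.Str.split? tp ",").getD []).filter
        (fun c => !(PySem.Str.strip c == ""))).map (fun c => PySem.Str.strip c)).filter
        (ptc_survives (rc.getD [])),
      PySem.Set.ofList ((((PySem.Str.split? tp ",").getD []).filter
        (fun c => !(PySem.Str.strip c == ""))).map (fun c => PySem.Str.strip c))) := by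
    simp [PySem.Set.update, PySem.Set.ofList_eq_foldl, PySem.Set.empty]
  rw [h0, ptc_fold2]
  rfl
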